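-- pv_equiv track=rewrite | github.com/vanathi-g/Design-And-Analysis-of-Algorithms | Boolean Satisfiability/satSolve.py | generateVarList
-- ===== SOURCE A (Python) =====
-- import math
--
-- def best_clause(f, used):
-- 	minLen = math.inf
-- 	for i in range(len(f)):
-- 		clause = f[i]
-- 		if len(clause) < minLen and i not in used:
-- 			minLen = len(clause)
-- 			clauseNo = i
-- 	return clauseNo
--
-- def generateVarList(f):
-- 	varList = []
-- 	used = []
-- 	while True:
-- 		num = best_clause(f, used)
-- 		used.append(num)
-- 		for var in f[num]:
-- 			if var[0] not in varList:
-- 				varList.append(var[0])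
-- 		if(len(used) == len(f)):
-- 			break
-- 	return varList
-- ===== SOURCE B (Python) =====
-- def generateVarList(f):
--     varList = []
--     seen = set()
--     for clause in sorted(f, key=len):
--         for var in clause:
--             c = var[0]
--             if c not in seen:
--                 seen.add(c)
--                 varList.append(c)
--     return varList
-- ===== Notes on version B (the rewrite author's own statement) =====
-- stated objective: faster
-- what changed: Replaces the repeated linear scan for the shortest unused clause (selection loop) and the list-membership dedup with one stable sort of the clauses by length followed by a single pass using a set for dedup.
-- outside the precondition, e.g. on generateVarList([]): A raises UnboundLocalError, B returns []
import Mathlib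
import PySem

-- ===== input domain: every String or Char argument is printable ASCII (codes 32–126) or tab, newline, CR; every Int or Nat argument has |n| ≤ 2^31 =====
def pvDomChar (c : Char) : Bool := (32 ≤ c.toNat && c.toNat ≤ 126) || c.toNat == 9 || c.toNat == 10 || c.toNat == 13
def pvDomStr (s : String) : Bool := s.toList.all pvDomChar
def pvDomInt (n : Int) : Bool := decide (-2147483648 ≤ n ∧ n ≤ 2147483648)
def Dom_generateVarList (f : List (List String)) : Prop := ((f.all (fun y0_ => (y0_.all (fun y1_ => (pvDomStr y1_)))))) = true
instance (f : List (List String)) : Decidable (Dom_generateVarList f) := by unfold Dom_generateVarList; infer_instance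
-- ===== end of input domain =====

-- B replaces A's quadratic shortest-unused-clause selection loop and list-membership dedup
-- by one stable sort of the clauses by length plus a single set-deduplicated pass (objective: faster).


-- ===== PORT A =====
-- best_clause: loop over i in range(len(f)); state = (minLen, clauseNo), none = math.inf / unbound
def bestClause (f : List (List String)) (used : List Nat) : Option Nat :=
  ((List.range f.length).foldl (fun st i =>
      if (match st.1 with | none => true | some m => decide ((f.getD i []).length < m))
           && !(used.contains i)
      then (some (f.getD i []).length, some i) else st)
    ((none : Option Nat), (none : Option Nat))).2

-- the inner 'for var in f[num]' loop; var[0] is PySem.Str.pyGet? var 0 (none = IndexError on "", outside Pre_)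
def innerA (varList : List String) (clause : List String) : List String :=
  clause.foldl (fun vl var =>
    match PySem.Str.pyGet? var 0 with
    | none => vl
    | some c => if vl.contains (String.mk [c]) then vl else vl ++ [String.mk [c]]) varList

-- the 'while True' loop; it runs exactly len(f) iterations, so fuel = len(f)
def runA (f : List (List String)) : Nat → List Nat → List String → List String
  | 0, _, varList => varList
  | fuel+1, used, varList =>
    match bestClause f used with
    | none => varList            -- Python: clauseNo unbound, UnboundLocalError (outside Pre_)
    | some num =>
      let used' := used ++ [num]
      let varList' := innerA varList (f.getD num [])  -- num ∈ range(len f), always in range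
      if used'.length = f.length then varList' else runA f fuel used' varList'

def generateVarList (f : List (List String)) : List String := runA f f.length [] []

-- ===== PORT B =====
def generateVarList_alt (f : List (List String)) : List String :=
  ((PySem.List.sorted f (fun c => c.length)).foldl (fun st clause =>
      clause.foldl (fun st var =>
        match PySem.Str.pyGet? var 0 with
        | none => st             -- IndexError on "" (outside Pre_)
        | some ch =>
          let c := String.mk [ch]
          if PySem.Set.contains st.1 c then st
          else (PySem.Set.add st.1 c, st.2 ++ [c])) st)
    ((PySem.Set.empty : PySem.Set String), ([] : List String))).2

-- ===== PRECONDITION & SPEC =====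
-- Python A raises UnboundLocalError on f = [] and IndexError on an empty literal string; exactly those are excluded.
def Pre_generateVarList (f : List (List String)) : Prop :=
  f ≠ [] ∧ ∀ c ∈ f, ∀ v ∈ c, v ≠ ""
instance (f : List (List String)) : Decidable (Pre_generateVarList f) := by
  unfold Pre_generateVarList; infer_instance
def pvWitness_generateVarList : List (List String) := [["x1", "-y2"], ["z3"]]

def Spec_generateVarList (f : List (List String)) (out : List String) : Prop := out = generateVarList_alt f
instance (f : List (List String)) (out : List String) : Decidable (Spec_generateVarList f out) := by unfold Spec_generateVarList; infer_instance

-- ===== CLAIM (what is proved, stated in full; the proofs are below) =====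
def Claim_equal_generateVarList : Prop := ∀ (f : List (List String)), Dom_generateVarList f → Pre_generateVarList f → Spec_generateVarList f (generateVarList f)

-- ===== LEMMAS AND PROOFS =====

def kf (f : List (List String)) (i : Nat) : Nat := (f.getD i []).length * (f.length + 1) + i
def Sf (f : List (List String)) : List Nat := PySem.List.sorted (List.range f.length) (kf f)
lemma kf_inj {f : List (List String)} {a b : Nat} (ha : a < f.length + 1) (hb : b < f.length + 1)
    (h : kf f a = kf f b) : a = b := by
  have := congrArg (· % (f.length + 1)) h
  simpa [kf, Nat.mul_add_mod, Nat.mod_eq_of_lt ha, Nat.mod_eq_of_lt hb] using this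
lemma Sf_perm (f : List (List String)) : (Sf f).Perm (List.range f.length) :=
  PySem.List.sorted_perm _ _ _
lemma Sf_nodup (f : List (List String)) : (Sf f).Nodup :=
  ((Sf_perm f).symm).nodup (List.nodup_range)
lemma Sf_length (f : List (List String)) : (Sf f).length = f.length := by
  simpa using (Sf_perm f).length_eq
lemma Sf_mem_lt (f : List (List String)) {i : Nat} (h : i ∈ Sf f) : i < f.length := by
  have := (Sf_perm f).mem_iff.mp h; simpa using this
lemma Sf_pairwise (f : List (List String)) : (Sf f).Pairwise (fun a b => kf f a < kf f b) := by
  have hle : (Sf f).Pairwise (fun a b => kf f a ≤ kf f b) := PySem.List.sorted_pairwise _ _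
  have hne : (Sf f).Pairwise (fun a b => a ≠ b) := Sf_nodup f
  refine (hle.and hne).imp_of_mem ?_
  intro a b ha hb h
  exact lt_of_le_of_ne h.1 (fun he => h.2 (kf_inj (by have := Sf_mem_lt f ha; omega) (by have := Sf_mem_lt f hb; omega) he))

lemma key_lt_iff {a b t j n : Nat} (hjt : j < t) (htn : t ≤ n) :
    a < b ↔ a * (n + 1) + t < b * (n + 1) + j := by
  constructor
  · intro h; nlinarith
  · intro h; by_contra hc
    have : b ≤ a := by omega
    nlinarith

lemma map_insertBy {α : Type} (g : Nat → α) (b1 : α → α → Bool) (b2 : Nat → Nat → Bool)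
    (x : Nat) (ys : List Nat) (h : ∀ y ∈ ys, b1 (g x) (g y) = b2 x y) :
    PySem.List.insertBy b1 (g x) (ys.map g) = (PySem.List.insertBy b2 x ys).map g := by
  induction ys with
  | nil => simp [PySem.List.insertBy]
  | cons y ys ih =>
    simp only [List.map_cons, PySem.List.insertBy, h y (by simp)]
    by_cases hb : b2 x y
    · simp [hb]
    · simp [hb, ih (fun z hz => h z (by simp [hz]))]

lemma sorted_take (f : List (List String)) : ∀ t, t ≤ f.length →
    PySem.List.sorted (f.take t) (fun c => c.length)
      = (PySem.List.sorted (List.range t) (kf f)).map (fun i => f.getD i []) := by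
  intro t
  induction t with
  | zero => intro _; simp [PySem.List.sorted]
  | succ t ih =>
    intro ht
    have ht' : t < f.length := ht
    rw [List.take_succ, List.getElem?_eq_getElem ht']
    rw [List.range_succ]
    rw [PySem.List.sorted_eq_foldl_insertBy, PySem.List.sorted_eq_foldl_insertBy,
        List.foldl_append, List.foldl_append]
    rw [← PySem.List.sorted_eq_foldl_insertBy, ← PySem.List.sorted_eq_foldl_insertBy]
    rw [ih (le_of_lt ht')]
    simp only [Option.toList_some, List.foldl_cons, List.foldl_nil]
    rw [show f[t] = f.getD t [] from (List.getD_eq_getElem f [] ht').symm]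
    refine (map_insertBy (fun i => f.getD i [])
      (fun a b => decide (a.length < b.length))
      (fun a b => decide (kf f a < kf f b)) t (PySem.List.sorted (List.range t) (kf f)) ?_)
    intro j hj
    have hjt : j < t := by simpa using (PySem.List.mem_sorted _ _ _ _).mp hj
    have hiff := key_lt_iff (a := (f.getD t []).length) (b := (f.getD j []).length) hjt (le_of_lt ht')
    simp only [kf] at hiff ⊢
    exact decide_eq_decide.mpr hiff

lemma sorted_map_eq (f : List (List String)) :
    PySem.List.sorted f (fun c => c.length) = (Sf f).map (fun i => f.getD i []) := by
  have := sorted_take f f.length (le_refl _)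
  simpa [Sf] using this

def bstep (f : List (List String)) (st : Option Nat × Option Nat) (i : Nat) : Option Nat × Option Nat :=
  if (match st.1 with | none => true | some m => decide ((f.getD i []).length < m))
  then (some (f.getD i []).length, some i) else st

lemma bestClause_filter (f : List (List String)) (used : List Nat) :
    bestClause f used =
      (((List.range f.length).filter (fun i => !used.contains i)).foldl (bstep f)
        ((none : Option Nat), (none : Option Nat))).2 := by
  unfold bestClause
  rw [show (fun (st : Option Nat × Option Nat) i =>
      if (match st.1 with | none => true | some m => decide ((f.getD i []).length < m))
           && !(used.contains i)
      then ((some (f.getD i []).length : Option Nat), (some i : Option Nat)) else st)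
    = (fun st i => if (!used.contains i : Bool) then bstep f st i else st) from ?_]
  · rw [PySem.List.foldl_if_eq_foldl_filter]
  · funext st i
    unfold bstep
    cases h1 : (match st.1 with | none => true | some m => decide ((f.getD i []).length < m)) <;>
      cases h2 : (!used.contains i : Bool) <;> simp

lemma bstep_go (f : List (List String)) : ∀ (l : List Nat) (m : Nat),
    (∀ i ∈ l, m < i) → (∀ i ∈ l, i < f.length) → m < f.length → l.Pairwise (· < ·) →
    (l.foldl (bstep f) (some (f.getD m []).length, some m)).2
      = l.foldl (fun acc x =>
          match acc with
          | none => some x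
          | some m => if kf f x < kf f m then some x else some m) (some m) := by
  intro l
  induction l with
  | nil => intro m _ _ _ _; rfl
  | cons x xs ih =>
    intro m hgt hlt hm hpw
    have hx : m < x := hgt x (by simp)
    have hxn : x < f.length := hlt x (by simp)
    have hiff : ((f.getD x []).length < (f.getD m []).length) ↔ kf f x < kf f m := by
      simpa [kf] using key_lt_iff (a := (f.getD x []).length) (b := (f.getD m []).length) hx (le_of_lt hxn)
    simp only [List.foldl_cons, bstep, decide_eq_true_eq]
    by_cases hlen : (f.getD x []).length < (f.getD m []).length
    · rw [if_pos hlen, if_pos (hiff.mp hlen)]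
      exact ih x (fun i hi => (List.pairwise_cons.mp hpw).1 i hi)
        (fun i hi => hlt i (by simp [hi])) hxn (List.pairwise_cons.mp hpw).2
    · rw [if_neg hlen, if_neg (fun hc => hlen (hiff.mpr hc))]
      exact ih m (fun i hi => lt_trans hx ((List.pairwise_cons.mp hpw).1 i hi))
        (fun i hi => hlt i (by simp [hi])) hm (List.pairwise_cons.mp hpw).2

lemma bstep_min? (f : List (List String)) (l : List Nat)
    (hlt : ∀ i ∈ l, i < f.length) (hpw : l.Pairwise (· < ·)) :
    (l.foldl (bstep f) ((none : Option Nat), (none : Option Nat))).2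
      = PySem.List.min? l (kf f) := by
  cases l with
  | nil => rfl
  | cons x xs =>
    have hxn : x < f.length := hlt x (by simp)
    simp only [List.foldl_cons, bstep, PySem.List.min?]
    rw [if_pos trivial]
    rw [bstep_go f xs x (fun i hi => (List.pairwise_cons.mp hpw).1 i hi)
      (fun i hi => hlt i (by simp [hi])) hxn (List.pairwise_cons.mp hpw).2]
    apply PySem.List.foldl_congr_mem
    intro acc y _
    cases acc <;> rfl

lemma bestClause_eq_min? (f : List (List String)) (used : List Nat) :
    bestClause f used =
      PySem.List.min? ((List.range f.length).filter (fun i => !used.contains i)) (kf f) := by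
  rw [bestClause_filter]
  exact bstep_min? f _ (fun i hi => List.mem_range.mp (List.mem_of_mem_filter hi))
    ((List.pairwise_lt_range).filter _)

def procC (vl : List String) (cs : List (List String)) : List String := cs.foldl innerA vl

lemma altInner (clause : List String) : ∀ (vl : List String),
    clause.foldl (fun st var =>
        match PySem.Str.pyGet? var 0 with
        | none => st
        | some ch =>
          let c := String.mk [ch]
          if PySem.Set.contains st.1 c then st
          else (PySem.Set.add st.1 c, st.2 ++ [c])) ((vl, vl) : PySem.Set String × List String)
      = (innerA vl clause, innerA vl clause) := by
  induction clause with
  | nil => intro vl; simp [innerA]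
  | cons v vs ih =>
    intro vl
    simp only [List.foldl_cons, innerA] at *
    cases hg : PySem.Str.pyGet? v 0 with
    | none => simpa [hg] using ih vl
    | some ch =>
      by_cases hc : String.mk [ch] ∈ vl
      · simpa [hg, hc, PySem.Set.contains] using ih vl
      · simpa [hg, hc, PySem.Set.contains, PySem.Set.add] using ih (vl ++ [String.mk [ch]])

lemma altOuter (cs : List (List String)) : ∀ (vl : List String),
    cs.foldl (fun st clause =>
      clause.foldl (fun st var =>
        match PySem.Str.pyGet? var 0 with
        | none => st
        | some ch =>
          let c := String.mk [ch]
          if PySem.Set.contains st.1 c then st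
          else (PySem.Set.add st.1 c, st.2 ++ [c])) st) ((vl, vl) : PySem.Set String × List String)
      = (procC vl cs, procC vl cs) := by
  induction cs with
  | nil => intro vl; simp [procC]
  | cons c cs ih =>
    intro vl
    simp only [List.foldl_cons, procC] at *
    rw [altInner c vl, ih (innerA vl c)]

lemma alt_eq_proc (f : List (List String)) :
    generateVarList_alt f = procC [] (PySem.List.sorted f (fun c => c.length)) := by
  unfold generateVarList_alt
  rw [show ((PySem.Set.empty : PySem.Set String), ([] : List String)) = (([] : List String), ([] : List String)) from rfl]
  rw [altOuter]

lemma Sf_getElem_mem (f : List (List String)) (t : Nat) (ht : t < (Sf f).length) :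
    (Sf f)[t] ∈ Sf f := List.getElem_mem ht

lemma bestClause_take (f : List (List String)) (t : Nat) (ht : t < f.length) :
    bestClause f ((Sf f).take t)
      = some ((Sf f)[t]'(by rw [Sf_length]; exact ht)) := by
  have htS : t < (Sf f).length := by rw [Sf_length]; exact ht
  rw [bestClause_eq_min?]
  have hdropc : (Sf f).drop t = (Sf f)[t] :: (Sf f).drop (t + 1) :=
    List.drop_eq_getElem_cons htS
  have hsplit : (Sf f).take t ++ (Sf f).drop t = Sf f := List.take_append_drop t (Sf f)
  have hnd : ((Sf f).take t ++ (Sf f).drop t).Nodup := by rw [hsplit]; exact Sf_nodup f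
  have hdisj : ∀ a ∈ (Sf f).drop t, a ∉ (Sf f).take t := by
    intro a ha hta
    exact (List.nodup_append.mp hnd).2.2 a hta a ha rfl
  have hfilt : ((Sf f).filter (fun i => !((Sf f).take t).contains i)) = (Sf f).drop t := by
    conv_lhs => rw [← hsplit]
    rw [List.filter_append]
    rw [List.filter_eq_nil_iff.mpr (fun a ha => by simp [ha])]
    rw [List.filter_eq_self.mpr (fun a ha => by simp [hdisj a ha])]
    simp
  have hperm : ((List.range f.length).filter (fun i => !((Sf f).take t).contains i)).Perm
      ((Sf f).drop t) := by
    rw [← hfilt]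
    exact ((Sf_perm f).filter _).symm
  have hmemR : (Sf f)[t]'htS ∈
      (List.range f.length).filter (fun i => !((Sf f).take t).contains i) := by
    rw [hperm.mem_iff, hdropc]; exact List.mem_cons_self
  obtain ⟨m, hm⟩ : ∃ m, PySem.List.min?
      ((List.range f.length).filter (fun i => !((Sf f).take t).contains i)) (kf f) = some m := by
    cases h : PySem.List.min?
        ((List.range f.length).filter (fun i => !((Sf f).take t).contains i)) (kf f) with
    | none =>
      rw [PySem.List.min?_eq_none_iff] at h
      rw [h] at hmemR; cases hmemR
    | some m => exact ⟨m, rfl⟩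
  have hmmem : m ∈ (Sf f).drop t := hperm.mem_iff.mp (PySem.List.min?_mem hm)
  have hle1 : kf f m ≤ kf f ((Sf f)[t]'htS) := PySem.List.min?_isMin hm _ hmemR
  have hle2 : kf f ((Sf f)[t]'htS) ≤ kf f m := by
    rw [hdropc] at hmmem
    rcases List.mem_cons.mp hmmem with h | h
    · rw [h]
    · have hpw := (Sf_pairwise f).drop (i := t)
      rw [hdropc] at hpw
      exact le_of_lt ((List.pairwise_cons.mp hpw).1 m h)
  have hmlt : m < f.length := Sf_mem_lt f (List.mem_of_mem_drop hmmem)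
  have htlt : (Sf f)[t]'htS < f.length := Sf_mem_lt f (Sf_getElem_mem f t htS)
  rw [hm]
  congr 1
  exact kf_inj (by omega) (by omega) (le_antisymm hle1 hle2)

lemma runA_eq (f : List (List String)) :
    ∀ (m t : Nat) (vl : List String), t + m = f.length → t < f.length →
      runA f m ((Sf f).take t) vl =
        ((Sf f).drop t).foldl (fun vl i => innerA vl (f.getD i [])) vl := by
  intro m
  induction m with
  | zero => intro t vl h1 h2; omega
  | succ m ih =>
    intro t vl h1 h2
    have htS : t < (Sf f).length := by rw [Sf_length]; exact h2
    rw [runA, bestClause_take f t h2]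
    simp only []
    have htake : (Sf f).take t ++ [(Sf f)[t]'htS] = (Sf f).take (t + 1) := by
      rw [List.take_succ, List.getElem?_eq_getElem htS]; rfl
    have hlen : ((Sf f).take t ++ [(Sf f)[t]'htS]).length = t + 1 := by
      rw [htake, List.length_take]
      rw [Sf_length]; omega
    rw [List.drop_eq_getElem_cons htS, List.foldl_cons]
    by_cases hend : t + 1 = f.length
    · rw [if_pos (by rw [hlen]; exact hend)]
      have : (Sf f).drop (t + 1) = [] := by
        apply List.drop_eq_nil_of_le
        rw [Sf_length]; omega
      rw [this, List.foldl_nil]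
    · rw [if_neg (by rw [hlen]; exact hend)]
      rw [htake]
      exact ih (t + 1) (innerA vl (f.getD ((Sf f)[t]'htS) [])) (by omega) (by omega)

theorem main_eq (f : List (List String)) : generateVarList f = generateVarList_alt f := by
  rcases Nat.eq_zero_or_pos f.length with h0 | hpos
  · have : f = [] := List.length_eq_zero_iff.mp h0
    subst this; rfl
  · unfold generateVarList
    have h := runA_eq f f.length 0 [] (by omega) hpos
    simp only [List.take_zero, List.drop_zero] at h
    rw [h, alt_eq_proc, sorted_map_eq]
    unfold procC
    rw [List.foldl_map]

-- ===== VERDICT (by name: the statement is the Claim_ definition above) =====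
theorem generateVarList_spec : Claim_equal_generateVarList := by
  intro f _ _
  exact main_eq f
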